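-- pv_equiv track=rewrite | github.com/osvaldoandrade/sous | test_sous.py | redact_argv
-- ===== SOURCE A (Python) =====
-- def redact_argv(argv: list[str]) -> list[str]:
--     """Redact secrets from argv for logging only."""
--     out: list[str] = []
--     redact_next = False
--     for arg in argv:
--         if redact_next:
--             out.append("<redacted>")
--             redact_next = False
--             continue
--         if arg in ("--token", "--password", "--identity-api-key", "--api-key"):
--             out.append(arg)
--             redact_next = True
--             continue
--         out.append(arg)
--     return out
-- ===== SOURCE B (Python) =====
-- FLAGS = ("--token", "--password", "--identity-api-key", "--api-key")
--
--
-- def redact_argv(argv: list[str]) -> list[str]: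
--     """Redact secrets from argv for logging only.
--
--     Find-based scanning: repeatedly search the remaining list for the first
--     secret flag, copy everything up to and including it verbatim, replace the
--     following value (if any) with '<redacted>', and continue after the pair.
--     """
--     out: list[str] = []
--     rest = argv
--     while True:
--         idx = next((i for i, a in enumerate(rest) if a in FLAGS), None)
--         if idx is None:
--             out.extend(rest)
--             return out
--         out.extend(rest[: idx + 1])
--         if idx + 1 < len(rest):
--             out.append("<redacted>")
--         rest = rest[idx + 2:]
-- ===== Notes on version B (the rewrite author's own statement) =====
-- stated objective: alternative
-- what changed: Replaces A's element-by-element pass with a carried redact_next boolean by find-based scanning: repeatedly locate the first secret flag in the remainder, copy the prefix through the flag verbatim, emit '<redacted>' for the following value when it exists, and recurse on the list after the consumed pair.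
import Mathlib
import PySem

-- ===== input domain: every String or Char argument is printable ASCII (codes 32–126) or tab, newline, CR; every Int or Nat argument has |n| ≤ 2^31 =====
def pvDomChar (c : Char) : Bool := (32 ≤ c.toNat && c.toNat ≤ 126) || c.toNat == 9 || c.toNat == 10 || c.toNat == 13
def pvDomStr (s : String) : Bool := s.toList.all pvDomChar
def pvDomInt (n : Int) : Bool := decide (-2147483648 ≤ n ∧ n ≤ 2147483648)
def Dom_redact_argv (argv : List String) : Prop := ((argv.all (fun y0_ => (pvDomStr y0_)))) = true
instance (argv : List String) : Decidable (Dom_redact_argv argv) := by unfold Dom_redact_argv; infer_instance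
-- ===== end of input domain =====

-- B replaces A's per-element loop with a carried redact_next boolean by find-based
-- scanning (locate next flag, copy prefix, redact its value, continue after the pair);
-- an alternative decomposition, same cost.


-- ===== PORT A =====
-- membership test 'arg in ("--token", …)'
def pvIsFlag (a : String) : Bool :=
  a == "--token" || a == "--password" || a == "--identity-api-key" || a == "--api-key"

-- the for loop over argv carrying redact_next
def redactGoA : List String → Bool → List String
  | [], _ => []
  | a :: rest, rn =>
    if rn then
      "<redacted>" :: redactGoA rest false
    else if pvIsFlag a then
      a :: redactGoA rest true
    else
      a :: redactGoA rest false

def redact_argv (argv : List String) : List String :=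
  redactGoA argv false

-- ===== PORT B =====
-- the while loop over 'rest': find the first flag index; if none, emit the rest;
-- otherwise emit rest[:idx+1], then '<redacted>' when idx+1 < len(rest), and
-- continue with rest[idx+2:]
def redactGoB (rest : List String) : List String :=
  match h : rest.findIdx? pvIsFlag with
  | none => rest
  | some idx =>
    rest.take (idx + 1) ++
      (if idx + 1 < rest.length then ["<redacted>"] else []) ++
      redactGoB (rest.drop (idx + 2))
termination_by rest.length
decreasing_by
  have hlen : idx < rest.length := (List.findIdx?_eq_some_iff_getElem.mp h).1
  simp [List.length_drop]
  omega

def redact_argv_alt (argv : List String) : List String :=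
  redactGoB argv

-- ===== PRECONDITION & SPEC =====
def Spec_redact_argv (argv : List String) (out : List String) : Prop := out = redact_argv_alt argv
instance (argv : List String) (out : List String) : Decidable (Spec_redact_argv argv out) := by unfold Spec_redact_argv; infer_instance

-- ===== CLAIM (what is proved, stated in full; the proofs are below) =====
def Claim_equal_redact_argv : Prop := ∀ (argv : List String), Dom_redact_argv argv → Spec_redact_argv argv (redact_argv argv)

-- ===== LEMMAS AND PROOFS =====
theorem redactGoB_nil : redactGoB [] = [] := by
  rw [redactGoB.eq_def]; simp

theorem redactGoB_of_none (l : List String) (hr : l.findIdx? pvIsFlag = none) :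
    redactGoB l = l := by
  rw [redactGoB.eq_def]
  split
  next => rfl
  next idx hsome => rw [hr] at hsome; cases hsome

theorem redactGoB_of_some (l : List String) (j : ℕ) (hr : l.findIdx? pvIsFlag = some j) :
    redactGoB l = l.take (j + 1) ++
      (if j + 1 < l.length then ["<redacted>"] else []) ++ redactGoB (l.drop (j + 2)) := by
  rw [redactGoB.eq_def]
  split
  next hnone => rw [hr] at hnone; cases hnone
  next idx hsome =>
    rw [hr] at hsome
    cases hsome
    rfl

theorem redactGoB_cons_nonflag (a : String) (rest : List String) (h : pvIsFlag a = false) :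
    redactGoB (a :: rest) = a :: redactGoB rest := by
  rcases hr : rest.findIdx? pvIsFlag with _ | j
  · have hcons : (a :: rest).findIdx? pvIsFlag = none := by
      simp [List.findIdx?_cons, h, hr]
    rw [redactGoB_of_none _ hcons, redactGoB_of_none _ hr]
  · have hcons : (a :: rest).findIdx? pvIsFlag = some (j + 1) := by
      simp [List.findIdx?_cons, h, hr]
    rw [redactGoB_of_some _ _ hcons, redactGoB_of_some _ _ hr]
    have hd : List.drop (j + 1 + 2) (a :: rest) = List.drop (j + 2) rest := by
      have he : j + 1 + 2 = (j + 2) + 1 := by omega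
      rw [he, List.drop_succ_cons]
    rw [hd]
    simp only [List.length_cons, List.take_succ_cons, List.cons_append,
      Nat.add_lt_add_iff_right]

theorem redactGoB_cons_flag (a : String) (rest : List String) (h : pvIsFlag a = true) :
    redactGoB (a :: rest) =
      a :: (match rest with
            | [] => []
            | _ :: tl => "<redacted>" :: redactGoB tl) := by
  have hcons : (a :: rest).findIdx? pvIsFlag = some 0 := by
    simp [List.findIdx?_cons, h]
  rw [redactGoB_of_some _ _ hcons]
  cases rest with
  | nil => simp [redactGoB_nil]
  | cons x tl => simp

theorem redactGoAB_bounded : ∀ (n : ℕ) (l : List String), l.length ≤ n →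
    redactGoA l false = redactGoB l := by
  intro n
  induction n with
  | zero =>
    intro l hl
    have : l = [] := List.length_eq_zero_iff.mp (Nat.le_zero.mp hl)
    subst this
    simp [redactGoA, redactGoB_nil]
  | succ n ih =>
    intro l hl
    cases l with
    | nil => simp [redactGoA, redactGoB_nil]
    | cons a rest =>
      by_cases hf : pvIsFlag a = true
      · rw [redactGoB_cons_flag a rest hf]
        cases rest with
        | nil => simp [redactGoA, hf]
        | cons x tl =>
          have hlen : tl.length ≤ n := by
            simp [List.length_cons] at hl; omega
          simp [redactGoA, hf, ih tl hlen]
      · have hf' : pvIsFlag a = false := by simpa using hf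
        have hlen : rest.length ≤ n := by
          simp [List.length_cons] at hl; omega
        simp [redactGoA, hf', redactGoB_cons_nonflag a rest hf', ih rest hlen]

theorem redactGoAB (l : List String) : redactGoA l false = redactGoB l :=
  redactGoAB_bounded l.length l (le_refl _)

-- ===== VERDICT (by name: the statement is the Claim_ definition above) =====
theorem redact_argv_spec : Claim_equal_redact_argv := by
  intro argv _
  unfold Spec_redact_argv redact_argv redact_argv_alt
  exact redactGoAB argv
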